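-- pv_equiv track=rewrite | github.com/dandoug/cryptomath-book | src/utilities.py | factors_as_tuples
-- ===== SOURCE A (Python) =====
-- def format_factors(factors: list[int]) -> str:
--     """
--     Formats a list of integer factors into a mathematical expression string. The list
--     of factors represents prime factors of a number, and the output builds an expression
--     where repeated factors are represented with exponents. For example, a list of factors
--     [2, 2, 3] would result in the expression "2^2 * 3".
--
--     :param factors: A sorted list of integers representing the prime factors of a
--         number. The list must be in ascending order to correctly interpret repetitions.
--     :return: A string representation of the prime factorization in the form
--         "factor^exponent * ...", where repeated factors are grouped and represented with exponents.
--     """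
--     if not factors:
--         raise ValueError("empty list of factors")
--
--     last_factor = 0
--     last_factor_exp = 0
--     expression = ""
--     for f in factors:
--         if f < last_factor:
--             raise ValueError("factors must be positive integers and sorted in ascending order")
--         if f == last_factor:  # another instance of the same factor?
--             last_factor_exp += 1  # keeping track of the exponent
--         else:
--             # new factor, so add the previous factor to the expression, as long as it wasn't 0
--             if last_factor != 0:
--                 expression = _add_factor_to_rexpression(expression, last_factor, last_factor_exp)
--             # remember the new factor so we can add it later
--             last_factor = f
--             last_factor_exp = 1
--     # add the last one we saw
--     expression = _add_factor_to_rexpression(expression, last_factor, last_factor_exp)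
--     return expression
--
-- def factors_as_tuples(factors: list[int]) -> list[tuple[int, int]]:
--     """
--     Converts a given list of integer factors into a list of tuples representing
--     the factors and their corresponding exponents. Each factor is expressed as
--     a tuple of its numerical value and its exponent. If a factor does not have
--     an explicitly mentioned exponent, it is assumed to be 1.
--
--     :param factors: A list of integers representing the factors to be processed.
--     :type factors: list[int]
--     :return: A list of tuples where each tuple represents a factor and its
--         corresponding exponent.
--     :rtype: list[tuple[int, int]]
--     """
--     factor_string = format_factors(factors)
--     factor_strings = factor_string.split(" \\cdot ")
--     result = []
--     for fs in factor_strings: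
--         if "^" in fs:
--             factor, exp = fs.split("^")
--             result.append((int(factor), int(exp)))
--         else:
--             result.append((int(fs), 1))
--     return result
--
-- def _add_factor_to_rexpression(expression, factor, exp):
--     """
--     Appends a factor to the given mathematical expression with proper formatting. The
--     factor is added using a product separator if it is not the first factor
--     in the expression. An exponent is included in the output if specified.
--     """
--     if len(expression) > 0:  # not the first factor, then add \product separator
--         expression += " \\cdot "
--     if exp > 1:  # exponent required?
--         expression += f"{factor}^{exp}"
--     else:
--         expression += str(factor)
--     return expression
-- ===== SOURCE B (Python) =====
-- def factors_as_tuples(factors: list[int]) -> list[tuple[int, int]]: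
--     """Group the sorted factor list directly into (factor, exponent) tuples in one
--     pass, without formatting to a string and re-parsing it."""
--     if not factors:
--         raise ValueError("empty list of factors")
--     result = []
--     prev = 0
--     count = 0
--     for f in factors:
--         if f < prev:
--             raise ValueError("factors must be positive integers and sorted in ascending order")
--         if f == prev:
--             count += 1
--         else:
--             if prev != 0:
--                 result.append((prev, count))
--             prev = f
--             count = 1
--     result.append((prev, count))
--     return result
-- ===== Notes on version B (the rewrite author's own statement) =====
-- stated objective: simpler
-- what changed: B groups the sorted list into (factor, exponent) pairs directly in a single pass, eliminating A's detour of formatting the factors into a LaTeX string, splitting it on separators and re-parsing the integers.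
import Mathlib
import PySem

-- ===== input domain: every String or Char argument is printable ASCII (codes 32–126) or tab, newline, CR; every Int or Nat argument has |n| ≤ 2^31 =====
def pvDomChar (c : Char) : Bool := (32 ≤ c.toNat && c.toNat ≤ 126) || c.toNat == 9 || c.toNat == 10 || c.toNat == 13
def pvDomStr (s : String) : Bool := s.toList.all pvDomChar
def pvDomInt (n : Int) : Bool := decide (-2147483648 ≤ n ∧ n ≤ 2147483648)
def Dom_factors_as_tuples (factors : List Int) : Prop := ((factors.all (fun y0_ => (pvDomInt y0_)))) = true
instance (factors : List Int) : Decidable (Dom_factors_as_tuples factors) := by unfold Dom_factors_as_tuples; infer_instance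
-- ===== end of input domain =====

-- B replaces A's string round-trip (format to "f^e \cdot …", split, re-parse the ints)
-- by grouping the sorted factor list into (factor, exponent) pairs directly in one pass.

-- ===== PORT A =====

-- Hand port of Python's int(s) (PySem.Int.ofChars?'s internal parser is private to the
-- prelude, so its roundtrip with str(n) cannot be proved; this port is exact on the ASCII
-- domain: strip int-whitespace, optional sign, digits with single '_' between digits).
-- '_' only between digits: no two adjacent non-digits
def pvNoDoubleUnderscore : List Char → Bool
  | a :: b :: t => (a.isDigit || b.isDigit) && pvNoDoubleUnderscore (b :: t)
  | _ => true

def pvIntDigitsOk (ds : List Char) : Bool :=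
  !ds.isEmpty && ds.all (fun c => c.isDigit || c == '_')
    && ds.head?.all Char.isDigit && ds.getLast?.all Char.isDigit
    && pvNoDoubleUnderscore ds

def pvIntVal (ds : List Char) : Nat :=
  (ds.filter (fun c => c != '_')).foldl (fun a c => a * 10 + (c.toNat - 48)) 0

def pvIntOfChars? (s : List Char) : Option Int :=
  match ((s.dropWhile PySem.Int.isIntSpace).reverse.dropWhile PySem.Int.isIntSpace).reverse with
  | '-' :: ds => if pvIntDigitsOk ds then some (-(pvIntVal ds : Int)) else none
  | '+' :: ds => if pvIntDigitsOk ds then some ((pvIntVal ds : Int)) else none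
  | ds => if pvIntDigitsOk ds then some ((pvIntVal ds : Int)) else none

-- Hand port of Python's s.split(sep) for a nonempty separator c :: cs (exact; the
-- separator is passed head/tail so that termination is structural).
def pvSplitGo (c : Char) (cs : List Char) : List Char → List Char → List (List Char) → List (List Char)
  | [], cur, acc => (cur.reverse :: acc).reverse
  | x :: rest, cur, acc =>
    if (c :: cs).isPrefixOf (x :: rest) then
      pvSplitGo c cs ((x :: rest).drop (c :: cs).length) [] (cur.reverse :: acc)
    else pvSplitGo c cs rest (x :: cur) acc
  termination_by l => l.length
  decreasing_by
    · rw [List.length_drop]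
      simp only [List.length_cons]
      omega
    · simp

def pvSplit (s : List Char) (c : Char) (cs : List Char) : List (List Char) :=
  pvSplitGo c cs s [] []

-- the separator " \cdot " of A, as a char list
def pvSep : List Char := [' ', '\\', 'c', 'd', 'o', 't', ' ']

-- _add_factor_to_rexpression
def pvAddFactor (expression : List Char) (factor exp : Int) : List Char :=
  let expression := if 0 < expression.length then expression ++ pvSep else expression
  if 1 < exp then expression ++ PySem.Int.toChars factor ++ '^' :: PySem.Int.toChars exp
  else expression ++ PySem.Int.toChars factor

-- one iteration of format_factors' loop; none = the ascending-order ValueError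
def pvStepA (st : Int × Int × List Char) (f : Int) : Option (Int × Int × List Char) :=
  if f < st.1 then none
  else if f = st.1 then some (st.1, st.2.1 + 1, st.2.2)
  else some (f, 1, if st.1 ≠ 0 then pvAddFactor st.2.2 st.1 st.2.1 else st.2.2)

-- format_factors; none = a ValueError was raised
def pvFormatFactors (factors : List Int) : Option (List Char) :=
  if factors.isEmpty then none
  else
    (factors.foldl (fun o f => Option.bind o (fun st => pvStepA st f)) (some (0, 0, ([] : List Char)))).map
      (fun st => pvAddFactor st.2.2 st.1 st.2.1)

def factors_as_tuples (factors : List Int) : List (Int × Int) :=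
  match pvFormatFactors factors with
  | none => []  -- format_factors raised; excluded by Pre_
  | some s =>
    (pvSplit s ' ' ['\\', 'c', 'd', 'o', 't', ' ']).foldl
      (fun result fs =>
        if PySem.Chars.isIn ['^'] fs then
          match pvSplit fs '^' [] with
          | [a, b] => result ++ [((pvIntOfChars? a).getD 0, (pvIntOfChars? b).getD 0)]
          | _ => result  -- Python's unpack would raise; unreachable on format_factors output
        else result ++ [((pvIntOfChars? fs).getD 0, 1)])  -- int() never fails on these; getD 0 unreachable
      []

-- ===== PORT B =====

-- one iteration of B's grouping loop; state (result, prev, count)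
def pvStepB (st : List (Int × Int) × Int × Int) (f : Int) : List (Int × Int) × Int × Int :=
  if f < st.2.1 then st  -- B raises here; excluded by Pre_
  else if f = st.2.1 then (st.1, st.2.1, st.2.2 + 1)
  else ((if st.2.1 ≠ 0 then st.1 ++ [(st.2.1, st.2.2)] else st.1), f, 1)

def factors_as_tuples_alt (factors : List Int) : List (Int × Int) :=
  if factors.isEmpty then []  -- B raises here; excluded by Pre_
  else
    let st := factors.foldl pvStepB ([], 0, 0)
    st.1 ++ [(st.2.1, st.2.2)]

-- ===== PRECONDITION & SPEC =====

-- Pre_: exactly the inputs where Python A returns (nonempty, nonnegative, nondecreasing);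
-- elsewhere A raises ValueError (empty list / 'factors must be positive … ascending order').
def Pre_factors_as_tuples (factors : List Int) : Prop :=
  factors ≠ [] ∧ List.IsChain (· ≤ ·) (0 :: factors)

instance (factors : List Int) : Decidable (Pre_factors_as_tuples factors) := by
  unfold Pre_factors_as_tuples; infer_instance

def pvWitness_factors_as_tuples : List Int := [2, 2, 3, 5]

def Spec_factors_as_tuples (factors : List Int) (out : List (Int × Int)) : Prop :=
  out = factors_as_tuples_alt factors
instance (factors : List Int) (out : List (Int × Int)) : Decidable (Spec_factors_as_tuples factors out) := by
  unfold Spec_factors_as_tuples; infer_instance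

-- ===== CLAIM (what is proved, stated in full; the proofs are below) =====
def Claim_equal_factors_as_tuples : Prop :=
  ∀ (factors : List Int), Dom_factors_as_tuples factors → Pre_factors_as_tuples factors →
    Spec_factors_as_tuples factors (factors_as_tuples factors)

-- ===== LEMMAS AND PROOFS =====

-- the rendered piece for one (factor, exponent) group, and the rendered whole expression
def pvPiece (p : Int × Int) : List Char :=
  if 1 < p.2 then PySem.Int.toChars p.1 ++ '^' :: PySem.Int.toChars p.2 else PySem.Int.toChars p.1

def pvRender (rs : List (Int × Int)) : List Char := pvSep.intercalate (rs.map pvPiece)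

-- ---- facts about str(n) for 0 ≤ n ----

theorem pvToChars_nonneg (n : Int) (h : 0 ≤ n) :
    PySem.Int.toChars n = Nat.toDigits 10 n.toNat := by
  simp [PySem.Int.toChars, show ¬ n < 0 by omega]

theorem pvToDigits_digits {c : Char} {m : Nat} (hc : c ∈ Nat.toDigits 10 m) : c.isDigit := by
  exact Nat.isDigit_of_mem_toDigits (by norm_num) (by norm_num) hc

theorem pvToDigits_ne_nil (m : Nat) : Nat.toDigits 10 m ≠ [] := by
  have := @Nat.length_toDigits_pos 10 m
  intro h; simp [h] at this

theorem pvDigitChar_lt10 {r : Nat} (h : r < 10) :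
    (Nat.digitChar r).isDigit = true ∧ (Nat.digitChar r).toNat - 48 = r := by
  interval_cases r <;> simp [Nat.digitChar]

theorem pvIntVal_toDigits (m : Nat) : pvIntVal (Nat.toDigits 10 m) = m := by
  have key : ∀ m : Nat, (Nat.toDigits 10 m).foldl (fun a c => a * 10 + (c.toNat - 48)) 0 = m := by
    intro m
    induction m using Nat.strong_induction_on with
    | _ m ih =>
      rw [Nat.toDigits_eq_if (by norm_num)]
      by_cases hm : m < 10
      · simp [hm, List.foldl, (pvDigitChar_lt10 hm).2]
      · have h10 : m / 10 < m := Nat.div_lt_self (by omega) (by norm_num)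
        have hr : m % 10 < 10 := Nat.mod_lt _ (by norm_num)
        simp only [hm, if_false, List.foldl_append, ih _ h10, List.foldl,
          (pvDigitChar_lt10 hr).2]
        omega
  unfold pvIntVal
  rw [List.filter_eq_self.2, key]
  intro c hc
  have := pvToDigits_digits hc
  simp only [ne_eq, bne_iff_ne]
  intro h; subst h; exact absurd this (by decide)

theorem pvNoDouble_digits (ds : List Char) (h : ∀ c ∈ ds, c.isDigit) :
    pvNoDoubleUnderscore ds = true := by
  induction ds with
  | nil => rfl
  | cons a t ih =>
    rcases t with _ | ⟨b, t'⟩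
    · rfl
    · rw [pvNoDoubleUnderscore]
      simp only [Bool.and_eq_true, Bool.or_eq_true]
      exact ⟨Or.inl (h a (by simp)), ih (fun c hc => h c (by simp at hc ⊢; tauto))⟩

theorem pvIntDigitsOk_digits (ds : List Char) (hne : ds ≠ []) (h : ∀ c ∈ ds, c.isDigit) :
    pvIntDigitsOk ds = true := by
  unfold pvIntDigitsOk
  rcases ds with _ | ⟨a, t⟩
  · simp at hne
  · simp only [Bool.and_eq_true, List.all_eq_true]
    refine ⟨⟨⟨⟨by simp, ?_⟩, by simp [h a (by simp)]⟩, ?_⟩, pvNoDouble_digits _ h⟩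
    · intro c hc; simp [h c hc]
    · rw [List.getLast?_eq_some_getLast (l := a :: t) (by simp)]
      simp only [Option.all_some]
      exact h _ (List.getLast_mem _)

theorem pvDigit_not_space {c : Char} (h : c.isDigit) : PySem.Int.isIntSpace c = false := by
  simp [Char.isDigit] at h
  simp [PySem.Int.isIntSpace, Char.ext_iff]
  refine ⟨⟨⟨⟨⟨?_, ?_⟩, ?_⟩, ?_⟩, ?_⟩, ?_⟩ <;> (intro he; rw [he] at h; exact absurd h (by decide))

theorem pvDropWhile_digits (ds : List Char) (h : ∀ c ∈ ds, c.isDigit) :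
    ds.dropWhile PySem.Int.isIntSpace = ds := by
  rcases ds with _ | ⟨a, t⟩
  · simp
  · rw [List.dropWhile_cons, pvDigit_not_space (h a (by simp))]; simp

-- int(str(n)) = n for 0 ≤ n (the only parses A performs)
theorem pvRoundtrip (n : Int) (h : 0 ≤ n) :
    pvIntOfChars? (PySem.Int.toChars n) = some n := by
  rw [pvToChars_nonneg n h]
  set ds := Nat.toDigits 10 n.toNat with hds
  have hdig : ∀ c ∈ ds, c.isDigit := fun c hc => pvToDigits_digits hc
  have hne : ds ≠ [] := pvToDigits_ne_nil _
  have hstrip :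
      ((ds.dropWhile PySem.Int.isIntSpace).reverse.dropWhile PySem.Int.isIntSpace).reverse = ds := by
    rw [pvDropWhile_digits ds hdig, pvDropWhile_digits, List.reverse_reverse]
    intro c hc; exact hdig c (by simpa using hc)
  unfold pvIntOfChars?
  rw [hstrip]
  have hval : pvIntVal ds = n.toNat := pvIntVal_toDigits _
  have hok := pvIntDigitsOk_digits ds hne hdig
  rcases ds with _ | ⟨a, t⟩
  · simp at hne
  · have ha : a.isDigit := hdig a (by simp)
    have ha' : a ≠ '-' ∧ a ≠ '+' := by
      constructor <;> (intro h'; subst h'; exact absurd ha (by decide))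
    split
    · next heq =>
      exact absurd (List.cons.inj heq).1 ha'.1
    · next heq =>
      exact absurd (List.cons.inj heq).1 ha'.2
    · simp only [hok, if_true, Option.some.injEq]
      omega

-- ---- facts about the splitter ----

theorem pvSplitGo_nil (c : Char) (cs cur : List Char) (acc : List (List Char)) :
    pvSplitGo c cs [] cur acc = (cur.reverse :: acc).reverse := by
  simp [pvSplitGo]

theorem pvSplitGo_skip (c : Char) (cs p r cur : List Char) (acc : List (List Char))
    (hp : ∀ x ∈ p, x ≠ c) :
    pvSplitGo c cs (p ++ r) cur acc = pvSplitGo c cs r (p.reverse ++ cur) acc := by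
  induction p generalizing cur with
  | nil => simp
  | cons x xs ih =>
    rw [List.cons_append, pvSplitGo]
    have hx : x ≠ c := hp x (by simp)
    have : (c :: cs).isPrefixOf (x :: (xs ++ r)) = false := by
      simp [List.isPrefixOf]; intro h; exact absurd h.symm hx
    rw [this]
    simp only [Bool.false_eq_true, if_false]
    rw [ih (x :: cur) (fun y hy => hp y (by simp [hy]))]
    simp

theorem pvSplitGo_sep (c : Char) (cs r cur : List Char) (acc : List (List Char)) :
    pvSplitGo c cs ((c :: cs) ++ r) cur acc = pvSplitGo c cs r [] (cur.reverse :: acc) := by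
  rw [List.cons_append, pvSplitGo]
  have : (c :: cs).isPrefixOf (c :: (cs ++ r)) = true := by
    rw [List.isPrefixOf_iff_prefix]
    exact List.prefix_append _ _
  rw [this]
  simp

theorem pvSplit_intercalate (c : Char) (cs : List Char) (ps : List (List Char))
    (hps : ∀ p ∈ ps, ∀ x ∈ p, x ≠ c) (hne : ps ≠ []) :
    ∀ acc, pvSplitGo c cs ((c :: cs).intercalate ps) [] acc = acc.reverse ++ ps := by
  induction ps with
  | nil => simp at hne
  | cons p rest ih =>
    intro acc
    rcases rest with _ | ⟨q, rest'⟩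
    · rw [show (c :: cs).intercalate [p] = p by simp [List.intercalate]]
      rw [show p = p ++ [] from (List.append_nil p).symm, pvSplitGo_skip _ _ _ _ _ _
        (hps p (by simp)), pvSplitGo_nil]
      simp
    · rw [show (c :: cs).intercalate (p :: q :: rest') =
          p ++ ((c :: cs) ++ (c :: cs).intercalate (q :: rest')) by
        simp [List.intercalate]]
      rw [pvSplitGo_skip _ _ _ _ _ _ (hps p (by simp)), pvSplitGo_sep,
        ih (fun p' hp' => hps p' (by simp at hp' ⊢; tauto)) (by simp)]
      simp

-- ---- facts about pieces and rendering ----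

theorem pvPiece_chars (p : Int × Int) (h1 : 0 ≤ p.1) (_h2 : 0 < p.2) :
    ∀ x ∈ pvPiece p, x.isDigit ∨ x = '^' := by
  intro x hx
  unfold pvPiece at hx
  split at hx
  · rw [pvToChars_nonneg p.1 h1, pvToChars_nonneg p.2 (by omega)] at hx
    simp at hx
    rcases hx with h | h | h
    · exact Or.inl (pvToDigits_digits h)
    · exact Or.inr h
    · exact Or.inl (pvToDigits_digits h)
  · rw [pvToChars_nonneg p.1 h1] at hx
    exact Or.inl (pvToDigits_digits hx)

theorem pvPiece_no_space (p : Int × Int) (h1 : 0 ≤ p.1) (h2 : 0 < p.2) :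
    ∀ x ∈ pvPiece p, x ≠ ' ' := by
  intro x hx
  rcases pvPiece_chars p h1 h2 x hx with h | h
  · intro he; subst he; simp [Char.isDigit] at h
  · intro he; rw [he] at h; simp at h

theorem pvPiece_ne_nil (p : Int × Int) : pvPiece p ≠ [] := by
  unfold pvPiece
  split <;> · simp only [PySem.Int.toChars]; split <;> simp [pvToDigits_ne_nil]

theorem pvRender_ne_nil (rs : List (Int × Int)) (h : rs ≠ []) : pvRender rs ≠ [] := by
  rcases rs with _ | ⟨p, rest⟩
  · simp at h
  · unfold pvRender
    rcases rest with _ | ⟨q, rest'⟩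
    · simpa [List.intercalate] using pvPiece_ne_nil p
    · simp only [List.map_cons]
      rw [show pvSep.intercalate (pvPiece p :: pvPiece q :: List.map pvPiece rest') =
          pvPiece p ++ (pvSep ++ pvSep.intercalate (pvPiece q :: List.map pvPiece rest')) by
        simp [List.intercalate]]
      simpa using fun h' => absurd h' (pvPiece_ne_nil p)

theorem pvIntercalate_append (sep x : List Char) (ps : List (List Char)) (hne : ps ≠ []) :
    sep.intercalate (ps ++ [x]) = sep.intercalate ps ++ sep ++ x := by
  induction ps with
  | nil => simp at hne
  | cons p rest ih =>
    rcases rest with _ | ⟨q, rest'⟩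
    · simp [List.intercalate]
    · rw [show ((p :: q :: rest') ++ [x]) = p :: ((q :: rest') ++ [x]) by simp,
        show sep.intercalate (p :: ((q :: rest') ++ [x])) =
          p ++ sep ++ sep.intercalate ((q :: rest') ++ [x]) by
          rcases rest' with _ | _ <;> simp [List.intercalate],
        ih (by simp),
        show sep.intercalate (p :: q :: rest') = p ++ sep ++ sep.intercalate (q :: rest') by
          simp [List.intercalate]]
      simp

theorem pvRender_append (rs : List (Int × Int)) (p0 : Int × Int) (hne : rs ≠ []) :
    pvRender (rs ++ [p0]) = pvRender rs ++ pvSep ++ pvPiece p0 := by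
  unfold pvRender
  rw [List.map_append, List.map_singleton, pvIntercalate_append _ _ _ (by simpa using hne)]

-- appending one group to the rendered expression = _add_factor_to_rexpression
theorem pvAddFactor_render (rs : List (Int × Int)) (f e : Int) :
    pvAddFactor (pvRender rs) f e = pvRender (rs ++ [(f, e)]) := by
  unfold pvAddFactor
  rcases rs with _ | ⟨p, rest⟩
  · simp [pvRender, List.intercalate, pvPiece]
  · have hne : pvRender (p :: rest) ≠ [] := pvRender_ne_nil _ (by simp)
    have hlen : 0 < (pvRender (p :: rest)).length := by
      rcases h : pvRender (p :: rest) with _ | _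
      · exact absurd h hne
      · simp
    rw [if_pos hlen]
    rw [pvRender_append _ _ (by simp)]
    unfold pvPiece
    split <;> simp

-- ---- the parse stage inverts rendering ----

theorem pvNoHat (n : Int) (h : 0 ≤ n) : ∀ x ∈ PySem.Int.toChars n, x ≠ '^' := by
  intro x hx he
  rw [pvToChars_nonneg n h] at hx
  have := pvToDigits_digits hx
  rw [he] at this; simp [Char.isDigit] at this

theorem pvParse_piece (result : List (Int × Int)) (p : Int × Int) (h1 : 0 ≤ p.1) (h2 : 0 < p.2) :
    (if PySem.Chars.isIn ['^'] (pvPiece p) then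
      match pvSplit (pvPiece p) '^' [] with
      | [a, b] => result ++ [((pvIntOfChars? a).getD 0, (pvIntOfChars? b).getD 0)]
      | _ => result
    else result ++ [((pvIntOfChars? (pvPiece p)).getD 0, 1)]) = result ++ [p] := by
  by_cases he : 1 < p.2
  · have hpiece : pvPiece p = PySem.Int.toChars p.1 ++ '^' :: PySem.Int.toChars p.2 := by
      unfold pvPiece; rw [if_pos he]
    have hin : PySem.Chars.isIn ['^'] (pvPiece p) = true := by
      rw [PySem.Chars.isIn_iff_infix, List.singleton_infix_iff, hpiece]
      simp
    rw [hin, if_pos rfl]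
    have hsplit : pvSplit (pvPiece p) '^' [] =
        [PySem.Int.toChars p.1, PySem.Int.toChars p.2] := by
      unfold pvSplit
      rw [hpiece, pvSplitGo_skip _ _ _ _ _ _ (pvNoHat p.1 h1),
        show ('^' :: PySem.Int.toChars p.2) = ('^' :: []) ++ PySem.Int.toChars p.2 by simp,
        pvSplitGo_sep,
        show PySem.Int.toChars p.2 = PySem.Int.toChars p.2 ++ [] from (List.append_nil _).symm,
        pvSplitGo_skip _ _ _ _ _ _ (pvNoHat p.2 (by omega)), pvSplitGo_nil]
      simp
    rw [hsplit]
    simp only [pvRoundtrip p.1 h1, pvRoundtrip p.2 (by omega), Option.getD_some]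
  · have hp2 : p.2 = 1 := by omega
    have hpiece : pvPiece p = PySem.Int.toChars p.1 := by unfold pvPiece; rw [if_neg he]
    have hin : PySem.Chars.isIn ['^'] (pvPiece p) = false := by
      rw [PySem.Chars.isIn_eq_false_iff, List.singleton_infix_iff, hpiece]
      intro hmem
      exact pvNoHat p.1 h1 '^' hmem rfl
    rw [hin]
    simp only [Bool.false_eq_true, if_false, hpiece, pvRoundtrip p.1 h1, Option.getD_some]
    rw [show ((p.1 : Int), (1 : Int)) = p by rw [← hp2]]

theorem pvParse_render (ps : List (Int × Int)) (hne : ps ≠ [])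
    (hp : ∀ p ∈ ps, 0 ≤ p.1 ∧ 0 < p.2) :
    ((pvSplit (pvRender ps) ' ' ['\\', 'c', 'd', 'o', 't', ' ']).foldl
      (fun result fs =>
        if PySem.Chars.isIn ['^'] fs then
          match pvSplit fs '^' [] with
          | [a, b] => result ++ [((pvIntOfChars? a).getD 0, (pvIntOfChars? b).getD 0)]
          | _ => result
        else result ++ [((pvIntOfChars? fs).getD 0, 1)])
      []) = ps := by
  have hsplit : pvSplit (pvRender ps) ' ' ['\\', 'c', 'd', 'o', 't', ' '] = ps.map pvPiece := by
    unfold pvSplit pvRender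
    rw [show pvSep = (' ' :: ['\\', 'c', 'd', 'o', 't', ' ']) from rfl]
    rw [pvSplit_intercalate _ _ _ ?_ (by simpa using hne) []]
    · simp
    · intro q hq x hx
      rcases List.mem_map.1 hq with ⟨p, hpmem, rfl⟩
      exact pvPiece_no_space p (hp p hpmem).1 (hp p hpmem).2 x hx
  rw [hsplit]
  suffices h : ∀ (ps : List (Int × Int)) (acc : List (Int × Int)),
      (∀ p ∈ ps, 0 ≤ p.1 ∧ 0 < p.2) →
      ((ps.map pvPiece).foldl
        (fun result fs =>
          if PySem.Chars.isIn ['^'] fs then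
            match pvSplit fs '^' [] with
            | [a, b] => result ++ [((pvIntOfChars? a).getD 0, (pvIntOfChars? b).getD 0)]
            | _ => result
          else result ++ [((pvIntOfChars? fs).getD 0, 1)])
        acc) = acc ++ ps by
    simpa using h ps [] hp
  intro ps'
  induction ps' with
  | nil => simp
  | cons p rest ih =>
    intro acc hp'
    simp only [List.map_cons, List.foldl_cons]
    rw [pvParse_piece acc p (hp' p (by simp)).1 (hp' p (by simp)).2,
      ih _ (fun q hq => hp' q (by simp [hq]))]
    simp

-- ---- the main loop invariant: A's fold state renders B's fold state ----

theorem pvLoop (fs : List Int) :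
    ∀ (lf exp : Int) (res : List (Int × Int)),
      0 ≤ lf → 0 < exp → List.IsChain (· ≤ ·) (lf :: fs) →
      (∀ p ∈ res, 0 ≤ p.1 ∧ 0 < p.2) →
      (fs.foldl (fun o f => Option.bind o (fun st => pvStepA st f)) (some (lf, exp, pvRender res))) =
        (some ((fs.foldl pvStepB (res, lf, exp)).2.1, (fs.foldl pvStepB (res, lf, exp)).2.2,
          pvRender (fs.foldl pvStepB (res, lf, exp)).1)) ∧
      0 ≤ (fs.foldl pvStepB (res, lf, exp)).2.1 ∧ 0 < (fs.foldl pvStepB (res, lf, exp)).2.2 ∧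
      (∀ p ∈ (fs.foldl pvStepB (res, lf, exp)).1, 0 ≤ p.1 ∧ 0 < p.2) := by
  induction fs with
  | nil => intro lf exp res h1 h2 _ h4; exact ⟨rfl, h1, h2, h4⟩
  | cons f rest ih =>
    intro lf exp res h1 h2 hch h4
    have hle : lf ≤ f := (List.isChain_cons_cons.1 hch).1
    have hch' : List.IsChain (· ≤ ·) (f :: rest) := (List.isChain_cons_cons.1 hch).2
    simp only [List.foldl_cons, Option.bind_some]
    by_cases heq : f = lf
    · subst heq
      rw [show pvStepA (f, exp, pvRender res) f = some (f, exp + 1, pvRender res) by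
          simp [pvStepA],
        show pvStepB (res, f, exp) f = (res, f, exp + 1) by simp [pvStepB]]
      exact ih f (exp + 1) res h1 (by omega) hch' h4
    · have hlt : lf < f := by omega
      rw [show pvStepA (lf, exp, pvRender res) f =
          some (f, 1, if lf ≠ 0 then pvAddFactor (pvRender res) lf exp else pvRender res) by
          simp [pvStepA]; omega,
        show pvStepB (res, lf, exp) f = ((if lf ≠ 0 then res ++ [(lf, exp)] else res), f, 1) by
          simp only [pvStepB]; rw [if_neg (by omega), if_neg heq]]
      by_cases hz : lf ≠ 0
      · rw [if_pos hz, if_pos hz, pvAddFactor_render]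
        exact ih f 1 (res ++ [(lf, exp)]) (by omega) (by omega) hch'
          (by intro p hp; rcases List.mem_append.1 hp with h | h
              · exact h4 p h
              · simp at h; subst h; exact ⟨by omega, by omega⟩)
      · rw [if_neg hz, if_neg hz]
        exact ih f 1 res (by omega) (by omega) hch' h4

-- ===== VERDICT (by name: the statement is the Claim_ definition above) =====
theorem factors_as_tuples_spec : Claim_equal_factors_as_tuples := by
  intro factors _ hpre
  rcases hpre with ⟨hne, hch⟩
  unfold Spec_factors_as_tuples factors_as_tuples factors_as_tuples_alt pvFormatFactors
  rcases factors with _ | ⟨f, rest⟩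
  · simp at hne
  · have hle : (0 : Int) ≤ f := (List.isChain_cons_cons.1 hch).1
    have hch' : List.IsChain (· ≤ ·) (f :: rest) := (List.isChain_cons_cons.1 hch).2
    simp only [List.isEmpty_cons, Bool.false_eq_true, if_false, List.foldl_cons,
      Option.bind_some]
    -- the first iteration from the sentinel state
    have hA1 : pvStepA (0, 0, ([] : List Char)) f = some (f, 1, pvRender []) := by
      by_cases h0 : f = 0
      · subst h0; simp [pvStepA, pvRender, List.intercalate]
      · have hnlt : ¬ f < 0 := by omega
        simp [pvStepA, pvRender, List.intercalate, h0, hnlt]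
    have hB1 : pvStepB (([] : List (Int × Int)), 0, 0) f = ([], f, 1) := by
      by_cases h0 : f = 0
      · subst h0; simp [pvStepB]
      · simp only [pvStepB]; rw [if_neg (by omega), if_neg h0]; simp
    rw [hA1, hB1]
    have hmain := pvLoop rest f 1 [] hle (by omega) hch' (by simp)
    rw [hmain.1]
    simp only [Option.map_some]
    rw [pvAddFactor_render]
    set stB := rest.foldl pvStepB ([], f, 1) with hstB
    rw [pvParse_render (stB.1 ++ [(stB.2.1, stB.2.2)]) (by simp)
      (by intro p hp; rcases List.mem_append.1 hp with h | h
          · exact hmain.2.2.2 p h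
          · simp at h; subst h; exact ⟨hmain.2.1, hmain.2.2.1⟩)]
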